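-- pv_equiv track=rewrite | github.com/proboscis/doeff | doeff/program.py | _string_annotation_is_effect
-- ===== SOURCE A (Python) =====
-- def _string_annotation_is_effect(annotation_text: str) -> bool:
--     if not annotation_text:
--         return False
--     stripped = annotation_text.strip()
--     if not stripped:
--         return False
--     if "|" in stripped:
--         return any(_string_annotation_is_effect(part) for part in stripped.split("|"))
--     if stripped.startswith("Optional[") and stripped.endswith("]"):
--         return _string_annotation_is_effect(stripped[9:-1])
--     if stripped.startswith("typing.Optional[") and stripped.endswith("]"):
--         return _string_annotation_is_effect(
--             stripped[len("typing.Optional["):-1]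
--         )
--     if stripped.startswith("Annotated[") and stripped.endswith("]"):
--         inner = stripped[len("Annotated["):-1]
--         first_part = inner.split(",", 1)[0]
--         return _string_annotation_is_effect(first_part)
--     normalized = stripped.replace(" ", "")
--     return (
--         normalized == "Effect"
--         or normalized == "EffectBase"
--         or normalized.startswith("Effect[")
--         or normalized.startswith("doeff.types.Effect")
--         or normalized.startswith("doeff.types.EffectBase")
--     )
-- ===== SOURCE B (Python) =====
-- def _unwrap(fragment):
--     if fragment.startswith("Optional[") and fragment.endswith("]"):
--         return fragment[9:-1]
--     if fragment.startswith("typing.Optional[") and fragment.endswith("]"):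
--         return fragment[16:-1]
--     if fragment.startswith("Annotated[") and fragment.endswith("]"):
--         return fragment[10:-1].split(",", 1)[0]
--     return None
--
--
-- def _is_effect_atom(normalized):
--     return normalized in ("Effect", "EffectBase") or normalized.startswith(
--         ("Effect[", "doeff.types.Effect")
--     )
--
--
-- def _string_annotation_is_effect(annotation_text: str) -> bool:
--     worklist = [annotation_text]
--     while worklist:
--         fragment = worklist.pop().strip()
--         if not fragment:
--             continue
--         if "|" in fragment:
--             worklist.extend(fragment.split("|"))
--             continue
--         inner = _unwrap(fragment)
--         if inner is not None:
--             worklist.append(inner)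
--             continue
--         if _is_effect_atom(fragment.replace(" ", "")):
--             return True
--     return False
-- ===== Notes on version B (the rewrite author's own statement) =====
-- stated objective: alternative
-- what changed: Replaces A's recursion with an iterative worklist (explicit stack of annotation fragments) split into small helpers, and drops A's redundant fifth base check (a 'doeff.types.EffectBase' prefix always has the 'doeff.types.Effect' prefix).
import Mathlib
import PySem

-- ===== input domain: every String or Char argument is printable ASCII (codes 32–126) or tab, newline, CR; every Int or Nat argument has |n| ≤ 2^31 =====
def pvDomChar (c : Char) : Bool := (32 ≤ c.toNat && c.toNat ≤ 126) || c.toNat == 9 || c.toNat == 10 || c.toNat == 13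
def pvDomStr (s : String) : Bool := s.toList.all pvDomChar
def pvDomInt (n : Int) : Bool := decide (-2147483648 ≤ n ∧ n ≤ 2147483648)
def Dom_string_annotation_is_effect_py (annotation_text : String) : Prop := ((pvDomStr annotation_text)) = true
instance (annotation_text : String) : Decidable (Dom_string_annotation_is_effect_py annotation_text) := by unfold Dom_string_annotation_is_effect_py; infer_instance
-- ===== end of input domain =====

-- B replaces A's recursion by an iterative worklist of fragments (and drops A's redundant
-- fifth base check); objective: alternative decomposition, same cost.

-- ===== PORT A =====
-- Literal port of A's recursion. The `0` fuel case is a totality guard only: every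
-- recursive call is on a strictly shorter fragment (proved in aCore_eq_fuel below),
-- so the wrapper's fuel `length + 1` always suffices.
-- `inner.split(",", 1)[0]` is ported as `.headD []`: Python's split always returns a
-- non-empty list, so `[0]` is its head and never raises.
def aCore : Nat → List Char → Bool
  | 0, _ => false
  | fuel + 1, cs =>
    if cs = [] then false
    else
      let stripped := PySem.Chars.strip cs
      if stripped = [] then false
      else if PySem.Chars.isIn ['|'] stripped then
        (PySem.Chars.splitOn stripped ['|']).any (fun part => aCore fuel part)
      else if PySem.Chars.startswith stripped "Optional[".toList && PySem.Chars.endswith stripped [']'] then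
        aCore fuel (PySem.Chars.slice stripped (some 9) (some (-1)))
      else if PySem.Chars.startswith stripped "typing.Optional[".toList && PySem.Chars.endswith stripped [']'] then
        aCore fuel (PySem.Chars.slice stripped (some 16) (some (-1)))
      else if PySem.Chars.startswith stripped "Annotated[".toList && PySem.Chars.endswith stripped [']'] then
        aCore fuel ((PySem.Chars.splitOnMax (PySem.Chars.slice stripped (some 10) (some (-1))) [','] 1).headD [])
      else
        let normalized := PySem.Chars.replace stripped [' '] []
        (normalized == "Effect".toList) || (normalized == "EffectBase".toList)
          || PySem.Chars.startswith normalized "Effect[".toList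
          || PySem.Chars.startswith normalized "doeff.types.Effect".toList
          || PySem.Chars.startswith normalized "doeff.types.EffectBase".toList

def string_annotation_is_effect_py (annotation_text : String) : Bool :=
  aCore (annotation_text.toList.length + 1) annotation_text.toList

-- ===== PORT B =====
def bUnwrap (fragment : List Char) : Option (List Char) :=
  if PySem.Chars.startswith fragment "Optional[".toList && PySem.Chars.endswith fragment [']'] then
    some (PySem.Chars.slice fragment (some 9) (some (-1)))
  else if PySem.Chars.startswith fragment "typing.Optional[".toList && PySem.Chars.endswith fragment [']'] then
    some (PySem.Chars.slice fragment (some 16) (some (-1)))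
  else if PySem.Chars.startswith fragment "Annotated[".toList && PySem.Chars.endswith fragment [']'] then
    -- `.split(",", 1)[0]` = head of a never-empty list
    some ((PySem.Chars.splitOnMax (PySem.Chars.slice fragment (some 10) (some (-1))) [','] 1).headD [])
  else none

def bIsEffectAtom (normalized : List Char) : Bool :=
  (normalized == "Effect".toList || normalized == "EffectBase".toList)
    || (PySem.Chars.startswith normalized "Effect[".toList
        || PySem.Chars.startswith normalized "doeff.types.Effect".toList)

-- The worklist's head is the top of the stack (`.pop()` pops it); `.extend(parts)`
-- makes the LAST part the new top, hence `parts.reverse ++ stack`. The `0` fuel case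
-- is a totality guard: each iteration strictly decreases the total measure
-- `sum (2*len+1)` (proved in bLoop_eq below), so the wrapper's fuel always suffices.
def bLoop : Nat → List (List Char) → Bool
  | 0, _ => false
  | _ + 1, [] => false
  | fuel + 1, top :: stack =>
    let fragment := PySem.Chars.strip top
    if fragment = [] then bLoop fuel stack
    else if PySem.Chars.isIn ['|'] fragment then
      bLoop fuel ((PySem.Chars.splitOn fragment ['|']).reverse ++ stack)
    else
      match bUnwrap fragment with
      | some inner => bLoop fuel (inner :: stack)
      | none =>
        if bIsEffectAtom (PySem.Chars.replace fragment [' '] []) then true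
        else bLoop fuel stack

def string_annotation_is_effect_py_alt (annotation_text : String) : Bool :=
  bLoop (2 * annotation_text.toList.length + 2) [annotation_text.toList]

-- ===== PRECONDITION & SPEC =====
def Spec_string_annotation_is_effect_py (annotation_text : String) (out : Bool) : Prop := out = string_annotation_is_effect_py_alt annotation_text
instance (annotation_text : String) (out : Bool) : Decidable (Spec_string_annotation_is_effect_py annotation_text out) := by unfold Spec_string_annotation_is_effect_py; infer_instance

-- ===== CLAIM (what is proved, stated in full; the proofs are below) =====
def Claim_equal_string_annotation_is_effect_py : Prop := ∀ (annotation_text : String), Dom_string_annotation_is_effect_py annotation_text → Spec_string_annotation_is_effect_py annotation_text (string_annotation_is_effect_py annotation_text)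

-- ===== LEMMAS AND PROOFS =====

-- A's recursion with "enough" fuel, as a function: the reference value.
def aFix (cs : List Char) : Bool := aCore (cs.length + 1) cs

-- simple structural description of `split` on the single character '|'
def mySplit : List Char → List (List Char)
  | [] => [[]]
  | c :: rest => if c = '|' then [] :: mySplit rest else (mySplit rest).modifyHead (c :: ·)

lemma length_strip_le (cs : List Char) : (PySem.Chars.strip cs).length ≤ cs.length := by
  simp only [PySem.Chars.strip, PySem.Chars.lstrip, PySem.Chars.rstrip, List.length_reverse]
  exact le_trans (List.length_dropWhile_le _ _) (by simpa using List.length_dropWhile_le (PySem.Chars.isspace) cs)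

lemma startswith_length {s p : List Char} (h : PySem.Chars.startswith s p = true) :
    p.length ≤ s.length :=
  ((PySem.Chars.startswith_iff s p).mp h).length_le

lemma isIn_bar {s : List Char} (h : PySem.Chars.isIn ['|'] s = true) : '|' ∈ s := by
  have h2 := ((PySem.Chars.isIn_iff_infix ['|'] s).mp h).sublist
  simpa using h2

lemma length_slice_lt {l : List Char} {a : Nat} (h1 : 1 ≤ a) (h2 : a ≤ l.length) :
    (PySem.List.slice l (some (a : Int)) (some (-1))).length < l.length := by
  simp only [PySem.List.slice, PySem.List.clampIdx]
  simp only [List.length_take, List.length_drop]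
  split_ifs <;> omega

lemma mySplit_ne_nil (l : List Char) : mySplit l ≠ [] := by
  induction l with
  | nil => simp [mySplit]
  | cons c rest ih =>
    simp only [mySplit]
    split_ifs
    · simp
    · cases h : mySplit rest with
      | nil => exact absurd h ih
      | cons p ps => simp

lemma splitOn_go_eq (l : List Char) : ∀ fuel cur acc, l.length < fuel →
    PySem.Chars.splitOn.go ['|'] fuel l cur acc
      = acc.reverse ++ (mySplit l).modifyHead (cur.reverse ++ ·) := by
  induction l with
  | nil =>
    intro fuel cur acc h
    cases fuel with
    | zero => omega
    | succ f => simp [PySem.Chars.splitOn.go, mySplit]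
  | cons c rest ih =>
    intro fuel cur acc h
    cases fuel with
    | zero => omega
    | succ f =>
      by_cases hc : c = '|'
      · subst hc
        rw [PySem.Chars.splitOn.go]
        have hpre : List.isPrefixOf ['|'] ('|' :: rest) = true := by
          simp [List.isPrefixOf]
        rw [if_pos hpre]
        simp only [List.length_cons, List.length_nil, List.drop_succ_cons, List.drop_zero]
        rw [ih f [] (List.reverse cur :: acc) (by simp at h; omega)]
        simp [mySplit]
        cases mySplit rest <;> simp
      · rw [PySem.Chars.splitOn.go]
        have hpre : List.isPrefixOf ['|'] (c :: rest) = false := by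
          simp [List.isPrefixOf]; exact fun hh => hc hh.symm
        rw [if_neg (by simp [hpre])]
        rw [ih f (c :: cur) acc (by simp at h; omega)]
        simp only [mySplit, if_neg hc]
        congr 1
        obtain ⟨p, ps, hp⟩ : ∃ p ps, mySplit rest = p :: ps := by
          cases h' : mySplit rest with
          | nil => exact absurd h' (mySplit_ne_nil rest)
          | cons p ps => exact ⟨p, ps, rfl⟩
        rw [hp]
        simp

lemma splitOn_eq_mySplit (l : List Char) : PySem.Chars.splitOn l ['|'] = mySplit l := by
  rw [PySem.Chars.splitOn, splitOn_go_eq l (l.length + 1) [] [] (by omega)]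
  simp
  cases h : mySplit l with
  | nil => exact absurd h (mySplit_ne_nil l)
  | cons p ps => simp

lemma mySplit_sum (l : List Char) :
    ((mySplit l).map List.length).sum + (mySplit l).length = l.length + 1 := by
  induction l with
  | nil => simp [mySplit]
  | cons c rest ih =>
    simp only [mySplit]
    split_ifs
    · simp; omega
    · obtain ⟨p, ps, hp⟩ : ∃ p ps, mySplit rest = p :: ps := by
        cases h' : mySplit rest with
        | nil => exact absurd h' (mySplit_ne_nil rest)
        | cons p ps => exact ⟨p, ps, rfl⟩
      rw [hp] at ih ⊢
      simp at ih ⊢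
      omega

lemma mySplit_two_le {l : List Char} (h : '|' ∈ l) : 2 ≤ (mySplit l).length := by
  induction l with
  | nil => simp at h
  | cons c rest ih =>
    simp only [mySplit]
    by_cases hc : c = '|'
    · rw [if_pos hc]
      have := List.length_pos_of_ne_nil (mySplit_ne_nil rest)
      simp; omega
    · rw [if_neg hc]
      have hm : '|' ∈ rest := by
        rcases List.mem_cons.mp h with h1 | h1
        · exact absurd h1.symm hc
        · exact h1
      have := ih hm
      simp [List.length_modifyHead]; omega

lemma part_lt {st : List Char} (hbar : PySem.Chars.isIn ['|'] st = true) :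
    ∀ p ∈ PySem.Chars.splitOn st ['|'], p.length < st.length := by
  intro p hp
  rw [splitOn_eq_mySplit] at hp
  have h1 := mySplit_sum st
  have h2 := mySplit_two_le (isIn_bar hbar)
  have h3 : p.length ∈ (mySplit st).map List.length := List.mem_map_of_mem hp
  have h4 : p.length ≤ ((mySplit st).map List.length).sum :=
    List.single_le_sum (fun x _ => Nat.zero_le x) _ h3
  omega

lemma sum_affine (xs : List (List Char)) :
    (xs.map (fun f => 2 * f.length + 1)).sum = 2 * ((xs.map List.length).sum) + xs.length := by
  induction xs with
  | nil => simp
  | cons x t ih => simp [ih]; ring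

lemma part_sum_le {st : List Char} (hbar : PySem.Chars.isIn ['|'] st = true) :
    ((PySem.Chars.splitOn st ['|']).map (fun f => 2 * f.length + 1)).sum ≤ 2 * st.length := by
  rw [splitOn_eq_mySplit, sum_affine]
  have h1 := mySplit_sum st
  have h2 := mySplit_two_le (isIn_bar hbar)
  omega

lemma splitOnMax_go_parts (sep : List Char) (hsep : sep ≠ []) :
    ∀ fuel l m cur acc p, p ∈ PySem.Chars.splitOnMax.go sep fuel m l cur acc →
      p ∈ acc ∨ p.length ≤ cur.length + l.length := by
  intro fuel
  induction fuel with
  | zero =>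
    intro l m cur acc p hp
    simp [PySem.Chars.splitOnMax.go] at hp
    rcases hp with h | h
    · left; exact h
    · right; simp [h]
  | succ f ih =>
    intro l m cur acc p hp
    cases l with
    | nil =>
      simp [PySem.Chars.splitOnMax.go] at hp
      rcases hp with h | h
      · left; exact h
      · right; simp [h]
    | cons c rest =>
      rw [PySem.Chars.splitOnMax.go] at hp
      by_cases hm : m = 0
      · rw [if_pos hm] at hp
        simp at hp
        rcases hp with h | h
        · left; exact h
        · right; simp [h]
      · rw [if_neg hm] at hp
        by_cases hpre : sep.isPrefixOf (c :: rest) = true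
        · rw [if_pos hpre] at hp
          rcases ih _ _ _ _ _ hp with h | h
          · rcases List.mem_cons.mp h with h1 | h1
            · right; simp [h1]
            · left; exact h1
          · right
            simp at h ⊢
            have hs : 0 < sep.length := List.length_pos_iff.mpr hsep
            have hd : (List.drop sep.length (c :: rest)).length ≤ rest.length := by
              simp [List.length_drop]; omega
            omega
        · rw [if_neg hpre] at hp
          rcases ih _ _ _ _ _ hp with h | h
          · left; exact h
          · right; simp at h ⊢; omega

lemma splitOnMax_go_ne_nil (sep : List Char) :
    ∀ fuel l m cur acc, PySem.Chars.splitOnMax.go sep fuel m l cur acc ≠ [] := by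
  intro fuel
  induction fuel with
  | zero => intro l m cur acc; simp [PySem.Chars.splitOnMax.go]
  | succ f ih =>
    intro l m cur acc
    cases l with
    | nil => simp [PySem.Chars.splitOnMax.go]
    | cons c rest =>
      rw [PySem.Chars.splitOnMax.go]
      by_cases hm : m = 0
      · rw [if_pos hm]; simp
      · rw [if_neg hm]
        split_ifs
        · exact ih _ _ _ _
        · exact ih _ _ _ _

lemma headD_splitOnMax_le (l : List Char) :
    ((PySem.Chars.splitOnMax l [','] 1).headD []).length ≤ l.length := by
  rw [PySem.Chars.splitOnMax]
  rw [if_neg (by omega)]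
  cases hres : PySem.Chars.splitOnMax.go [','] (l.length + 1) (Int.toNat 1) l [] [] with
  | nil => exact absurd hres (splitOnMax_go_ne_nil _ _ _ _ _ _)
  | cons p ps =>
    have hp : p ∈ PySem.Chars.splitOnMax.go [','] (l.length + 1) (Int.toNat 1) l [] [] := by
      rw [hres]; simp
    rcases splitOnMax_go_parts [','] (by simp) _ _ _ _ _ _ hp with h | h
    · simp at h
    · simpa using h

lemma bUnwrap_length {frag inner : List Char} (h : bUnwrap frag = some inner) :
    inner.length < frag.length := by
  unfold bUnwrap at h
  split_ifs at h with h1 h2 h3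
  · obtain ⟨hs, _⟩ := Bool.and_eq_true_iff.mp h1
    have h9 : (9 : Nat) ≤ frag.length := by
      have := startswith_length hs; simpa using this
    cases h
    simpa using length_slice_lt (l := frag) (a := 9) (by omega) h9
  · obtain ⟨hs, _⟩ := Bool.and_eq_true_iff.mp h2
    have h16 : (16 : Nat) ≤ frag.length := by
      have := startswith_length hs; simpa using this
    cases h
    simpa using length_slice_lt (l := frag) (a := 16) (by omega) h16
  · obtain ⟨hs, _⟩ := Bool.and_eq_true_iff.mp h3
    have h10 : (10 : Nat) ≤ frag.length := by
      have := startswith_length hs; simpa using this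
    cases h
    calc ((PySem.Chars.splitOnMax (PySem.Chars.slice frag (some 10) (some (-1))) [','] 1).headD []).length
        ≤ (PySem.Chars.slice frag (some 10) (some (-1))).length := headD_splitOnMax_le _
      _ < frag.length := by simpa using length_slice_lt (l := frag) (a := 10) (by omega) h10

lemma or_absorb (a b c d e : Bool) (h : e = true → d = true) :
    (a || b || c || d || e) = (a || b || (c || d)) := by
  cases e
  · simp [Bool.or_assoc]
  · simp [h rfl]

lemma base_pred_eq (n : List Char) :
    ((n == "Effect".toList) || (n == "EffectBase".toList)
      || PySem.Chars.startswith n "Effect[".toList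
      || PySem.Chars.startswith n "doeff.types.Effect".toList
      || PySem.Chars.startswith n "doeff.types.EffectBase".toList) = bIsEffectAtom n := by
  unfold bIsEffectAtom
  apply or_absorb
  intro h
  rw [PySem.Chars.startswith_iff] at h ⊢
  exact List.IsPrefix.trans (by decide) h

lemma aCore_eq_fuel : ∀ n cs f g, cs.length ≤ n → cs.length < f → cs.length < g →
    aCore f cs = aCore g cs := by
  intro n
  induction n with
  | zero =>
    intro cs f g hn hf hg
    have : cs = [] := List.eq_nil_of_length_eq_zero (by omega)
    subst this
    cases f with
    | zero => omega
    | succ f' =>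
      cases g with
      | zero => omega
      | succ g' => simp [aCore]
  | succ m ih =>
    intro cs f g hn hf hg
    cases f with
    | zero => omega
    | succ f' =>
      cases g with
      | zero => omega
      | succ g' =>
        by_cases h0 : cs = []
        · simp [aCore, h0]
        · simp only [aCore, if_neg h0]
          have hstrip := length_strip_le cs
          have hcs : 0 < cs.length := List.length_pos_iff.mpr h0
          by_cases h1 : PySem.Chars.strip cs = []
          · simp [h1]
          · simp only [if_neg h1]
            by_cases h2 : PySem.Chars.isIn ['|'] (PySem.Chars.strip cs) = true
            · simp only [if_pos h2]
              apply PySem.List.any_congr_mem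
              intro p hp
              have hlt := part_lt h2 p hp
              exact ih p f' g' (by omega) (by omega) (by omega)
            · simp only [if_neg h2]
              by_cases h3 : (PySem.Chars.startswith (PySem.Chars.strip cs) "Optional[".toList
                  && PySem.Chars.endswith (PySem.Chars.strip cs) [']']) = true
              · simp only [if_pos h3]
                have : bUnwrap (PySem.Chars.strip cs) = some (PySem.Chars.slice (PySem.Chars.strip cs) (some 9) (some (-1))) := by
                  unfold bUnwrap; rw [if_pos h3]
                have hlt := bUnwrap_length this
                exact ih _ f' g' (by omega) (by omega) (by omega)
              · simp only [if_neg h3]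
                by_cases h4 : (PySem.Chars.startswith (PySem.Chars.strip cs) "typing.Optional[".toList
                    && PySem.Chars.endswith (PySem.Chars.strip cs) [']']) = true
                · simp only [if_pos h4]
                  have : bUnwrap (PySem.Chars.strip cs) = some (PySem.Chars.slice (PySem.Chars.strip cs) (some 16) (some (-1))) := by
                    unfold bUnwrap; rw [if_neg h3, if_pos h4]
                  have hlt := bUnwrap_length this
                  exact ih _ f' g' (by omega) (by omega) (by omega)
                · simp only [if_neg h4]
                  by_cases h5 : (PySem.Chars.startswith (PySem.Chars.strip cs) "Annotated[".toList
                      && PySem.Chars.endswith (PySem.Chars.strip cs) [']']) = true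
                  · simp only [if_pos h5]
                    have : bUnwrap (PySem.Chars.strip cs) = some ((PySem.Chars.splitOnMax (PySem.Chars.slice (PySem.Chars.strip cs) (some 10) (some (-1))) [','] 1).headD []) := by
                      unfold bUnwrap; rw [if_neg h3, if_neg h4, if_pos h5]
                    have hlt := bUnwrap_length this
                    exact ih _ f' g' (by omega) (by omega) (by omega)
                  · simp only [if_neg h5]

lemma aCore_fix {cs : List Char} {f : Nat} (h : cs.length < f) : aCore f cs = aFix cs :=
  aCore_eq_fuel cs.length cs f (cs.length + 1) (by omega) h (by omega)

-- one step of A's recursion, phrased with B's helpers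
lemma aFix_step (cs : List Char) :
    aFix cs =
      (let fragment := PySem.Chars.strip cs
       if fragment = [] then false
       else if PySem.Chars.isIn ['|'] fragment then
         (PySem.Chars.splitOn fragment ['|']).any aFix
       else
         match bUnwrap fragment with
         | some inner => aFix inner
         | none => bIsEffectAtom (PySem.Chars.replace fragment [' '] [])) := by
  show aCore (cs.length + 1) cs = _
  by_cases h0 : cs = []
  · subst h0
    have hs : PySem.Chars.strip ([] : List Char) = [] := rfl
    simp [aCore, hs]
  · simp only [aCore, if_neg h0]
    have hstrip := length_strip_le cs
    have hcs : 0 < cs.length := List.length_pos_iff.mpr h0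
    by_cases h1 : PySem.Chars.strip cs = []
    · simp [h1]
    · simp only [if_neg h1]
      by_cases h2 : PySem.Chars.isIn ['|'] (PySem.Chars.strip cs) = true
      · simp only [if_pos h2]
        apply PySem.List.any_congr_mem
        intro p hp
        exact aCore_fix (by have := part_lt h2 p hp; omega)
      · simp only [if_neg h2]
        by_cases h3 : (PySem.Chars.startswith (PySem.Chars.strip cs) "Optional[".toList
            && PySem.Chars.endswith (PySem.Chars.strip cs) [']']) = true
        · have hb : bUnwrap (PySem.Chars.strip cs) = some (PySem.Chars.slice (PySem.Chars.strip cs) (some 9) (some (-1))) := by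
            unfold bUnwrap; rw [if_pos h3]
          simp only [if_pos h3, hb]
          exact aCore_fix (by have := bUnwrap_length hb; omega)
        · simp only [if_neg h3]
          by_cases h4 : (PySem.Chars.startswith (PySem.Chars.strip cs) "typing.Optional[".toList
              && PySem.Chars.endswith (PySem.Chars.strip cs) [']']) = true
          · have hb : bUnwrap (PySem.Chars.strip cs) = some (PySem.Chars.slice (PySem.Chars.strip cs) (some 16) (some (-1))) := by
              unfold bUnwrap; rw [if_neg h3, if_pos h4]
            simp only [if_pos h4, hb]
            exact aCore_fix (by have := bUnwrap_length hb; omega)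
          · simp only [if_neg h4]
            by_cases h5 : (PySem.Chars.startswith (PySem.Chars.strip cs) "Annotated[".toList
                && PySem.Chars.endswith (PySem.Chars.strip cs) [']']) = true
            · have hb : bUnwrap (PySem.Chars.strip cs) = some ((PySem.Chars.splitOnMax (PySem.Chars.slice (PySem.Chars.strip cs) (some 10) (some (-1))) [','] 1).headD []) := by
                unfold bUnwrap; rw [if_neg h3, if_neg h4, if_pos h5]
              simp only [if_pos h5, hb]
              exact aCore_fix (by have := bUnwrap_length hb; omega)
            · have hb : bUnwrap (PySem.Chars.strip cs) = none := by
                unfold bUnwrap; rw [if_neg h3, if_neg h4, if_neg h5]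
              simp only [if_neg h5, hb]
              exact base_pred_eq _

def mu (stack : List (List Char)) : Nat := (stack.map (fun f => 2 * f.length + 1)).sum

lemma bLoop_eq : ∀ fuel stack, mu stack < fuel → bLoop fuel stack = stack.any aFix := by
  intro fuel
  induction fuel with
  | zero => intro stack h; simp [mu] at h
  | succ f ih =>
    intro stack h
    cases stack with
    | nil => simp [bLoop]
    | cons top rest =>
      have hmu : mu (top :: rest) = 2 * top.length + 1 + mu rest := by
        simp [mu]
      have hstrip := length_strip_le top
      rw [List.any_cons, aFix_step top]
      simp only [bLoop]
      by_cases h1 : PySem.Chars.strip top = []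
      · simp only [if_pos h1]
        rw [ih rest (by omega)]
        simp
      · simp only [if_neg h1]
        by_cases h2 : PySem.Chars.isIn ['|'] (PySem.Chars.strip top) = true
        · simp only [if_pos h2]
          have hsum := part_sum_le h2
          have hmu2 : mu ((PySem.Chars.splitOn (PySem.Chars.strip top) ['|']).reverse ++ rest)
              = mu (PySem.Chars.splitOn (PySem.Chars.strip top) ['|']) + mu rest := by
            simp [mu]
          rw [ih _ (by rw [hmu2]; unfold mu at *; omega)]
          simp
        · simp only [if_neg h2]
          cases hb : bUnwrap (PySem.Chars.strip top) with
          | some inner =>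
            simp only [hb]
            have hlt := bUnwrap_length hb
            rw [ih (inner :: rest) (by
              rw [hmu] at h
              have h5 : mu (inner :: rest) = 2 * inner.length + 1 + mu rest := by
                simp [mu]
              rw [h5]; omega)]
            simp
          | none =>
            simp only [hb]
            by_cases h3 : bIsEffectAtom (PySem.Chars.replace (PySem.Chars.strip top) [' '] []) = true
            · simp [h3]
            · simp only [Bool.not_eq_true] at h3
              simp only [h3]
              rw [ih rest (by omega)]
              simp

-- ===== VERDICT (by name: the statement is the Claim_ definition above) =====
theorem string_annotation_is_effect_py_spec : Claim_equal_string_annotation_is_effect_py := by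
  intro s _
  unfold Spec_string_annotation_is_effect_py
  show string_annotation_is_effect_py s = string_annotation_is_effect_py_alt s
  unfold string_annotation_is_effect_py string_annotation_is_effect_py_alt
  rw [bLoop_eq (2 * s.toList.length + 2) [s.toList] (by simp [mu])]
  simp [List.any, aFix]
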